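-- pv_equiv track=rewrite | github.com/TitaAnca/Amorito-v.2 | app/servicios/matchServicio.py | verificar_compatibilidad_edad
-- ===== SOURCE A (Python) =====
-- def verificar_compatibilidad_edad(usuario1, usuario2):
--     rangos_edad = [
--         (18, 25),
--         (25, 35),
--         (35, 80),
--     ]
--
--     edad_usuario1 = usuario1['edad']
--     edad_usuario2 = usuario2['edad']
--
--     # Determinamos en qué rango de edad está cada uno
--     rango_usuario1 = next((r for r in rangos_edad if r[0] <= edad_usuario1 <= r[1]), None)
--     rango_usuario2 = next((r for r in rangos_edad if r[0] <= edad_usuario2 <= r[1]), None)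
--
--     return rango_usuario1 == rango_usuario2 #devuelve true o false
-- ===== SOURCE B (Python) =====
-- import bisect
--
-- _LIMITES = [25, 35, 80]  # upper bounds of the ranges (18,25), (25,35), (35,80)
--
-- def _bucket(edad):
--     if not (18 <= edad <= 80):
--         return None
--     return bisect.bisect_left(_LIMITES, edad)
--
-- def verificar_compatibilidad_edad(usuario1, usuario2):
--     return _bucket(usuario1['edad']) == _bucket(usuario2['edad'])
-- ===== Notes on version B (the rewrite author's own statement) =====
-- stated objective: idiomatic
-- what changed: Replaces the linear scan over a list of (low,high) range tuples with a guard 18<=edad<=80 plus a binary search (bisect_left) over the upper boundaries [25,35,80], comparing integer bucket keys instead of range tuples.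
import Mathlib
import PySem

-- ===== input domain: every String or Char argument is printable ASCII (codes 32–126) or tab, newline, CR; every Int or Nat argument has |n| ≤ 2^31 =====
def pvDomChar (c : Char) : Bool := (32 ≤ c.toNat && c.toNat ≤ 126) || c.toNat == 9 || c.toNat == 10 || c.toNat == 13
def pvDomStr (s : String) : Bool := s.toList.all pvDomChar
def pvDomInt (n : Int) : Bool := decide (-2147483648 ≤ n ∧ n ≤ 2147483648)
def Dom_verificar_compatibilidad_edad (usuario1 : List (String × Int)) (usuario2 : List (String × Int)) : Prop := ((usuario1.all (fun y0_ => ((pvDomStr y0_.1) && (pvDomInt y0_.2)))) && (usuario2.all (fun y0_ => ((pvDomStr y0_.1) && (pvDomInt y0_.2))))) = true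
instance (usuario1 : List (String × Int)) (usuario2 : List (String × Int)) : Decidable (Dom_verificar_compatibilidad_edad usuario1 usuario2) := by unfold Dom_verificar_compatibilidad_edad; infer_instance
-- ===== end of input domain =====

-- B replaces A's linear scan over (low,high) range tuples by a guard plus a
-- bisect_left binary search over the upper boundaries, comparing bucket keys.

-- ===== PORT A =====
-- dict lookup usuario['edad'] = first match in the association list (KeyError → none, excluded by Pre_)
def pvLookupEdad (usuario : List (String × Int)) : Option Int :=
  (usuario.find? (fun p => p.1 == "edad")).map (·.2)

-- next((r for r in rangos_edad if r[0] <= edad <= r[1]), None)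
def pvRango (edad : Int) : Option (Int × Int) :=
  ([(18, 25), (25, 35), (35, 80)] : List (Int × Int)).find?
    (fun r => decide (r.1 ≤ edad) && decide (edad ≤ r.2))

def verificar_compatibilidad_edad (usuario1 : List (String × Int)) (usuario2 : List (String × Int)) : Bool :=
  match pvLookupEdad usuario1, pvLookupEdad usuario2 with
  | some e1, some e2 => pvRango e1 == pvRango e2
  | _, _ => false   -- KeyError in Python; these inputs are excluded by Pre_

-- ===== PORT B =====
-- bisect.bisect_left(LIMITES, edad) = number of boundaries strictly below edad
def pvBisectLeft (limites : List Int) (edad : Int) : Nat :=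
  limites.countP (fun b => decide (b < edad))

def pvBucket (edad : Int) : Option Nat :=
  if 18 ≤ edad ∧ edad ≤ 80 then some (pvBisectLeft [25, 35, 80] edad) else none

-- B's own dict lookup usuario['edad'] (first match; KeyError → none, excluded by Pre_)
def pvLookupEdadAlt (usuario : List (String × Int)) : Option Int :=
  (usuario.find? (fun p => p.1 == "edad")).map (·.2)

def verificar_compatibilidad_edad_alt (usuario1 : List (String × Int)) (usuario2 : List (String × Int)) : Bool :=
  -- KeyError in Python when a lookup is none; those inputs are excluded by Pre_
  (((pvLookupEdadAlt usuario1).bind fun e1 =>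
    (pvLookupEdadAlt usuario2).map fun e2 => pvBucket e1 == pvBucket e2)).getD false

-- ===== PRECONDITION & SPEC =====
-- Pre_ excludes exactly the inputs on which Python A raises KeyError: a dict missing the key 'edad'.
def Pre_verificar_compatibilidad_edad (usuario1 : List (String × Int)) (usuario2 : List (String × Int)) : Prop :=
  (usuario1.find? (fun p => p.1 == "edad")).isSome ∧ (usuario2.find? (fun p => p.1 == "edad")).isSome
instance (usuario1 : List (String × Int)) (usuario2 : List (String × Int)) : Decidable (Pre_verificar_compatibilidad_edad usuario1 usuario2) := by unfold Pre_verificar_compatibilidad_edad; infer_instance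

def pvWitness_verificar_compatibilidad_edad : (List (String × Int)) × (List (String × Int)) :=
  ([("edad", 20)], [("edad", 24)])

def Spec_verificar_compatibilidad_edad (usuario1 : List (String × Int)) (usuario2 : List (String × Int)) (out : Bool) : Prop := out = verificar_compatibilidad_edad_alt usuario1 usuario2
instance (usuario1 : List (String × Int)) (usuario2 : List (String × Int)) (out : Bool) : Decidable (Spec_verificar_compatibilidad_edad usuario1 usuario2 out) := by unfold Spec_verificar_compatibilidad_edad; infer_instance

-- ===== CLAIM (what is proved, stated in full; the proofs are below) =====
def Claim_equal_verificar_compatibilidad_edad : Prop := ∀ (usuario1 : List (String × Int)) (usuario2 : List (String × Int)), Dom_verificar_compatibilidad_edad usuario1 usuario2 → Pre_verificar_compatibilidad_edad usuario1 usuario2 → Spec_verificar_compatibilidad_edad usuario1 usuario2 (verificar_compatibilidad_edad usuario1 usuario2)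

-- ===== LEMMAS AND PROOFS =====

-- proof-side classifier: which of the four age classes e falls into
def pvCls (e : Int) : Option Nat :=
  if e < 18 ∨ 80 < e then none
  else if e ≤ 25 then some 0
  else if e ≤ 35 then some 1
  else some 2

def pvG (n : Nat) : Int × Int :=
  if n = 0 then (18, 25) else if n = 1 then (25, 35) else (35, 80)

lemma bucket_eq_cls (e : Int) : pvBucket e = pvCls e := by
  unfold pvBucket pvBisectLeft pvCls
  simp only [List.countP, List.countP.go]
  by_cases h0 : 18 ≤ e ∧ e ≤ 80
  · by_cases hA : e ≤ 25
    · simp [h0, show ¬(25 < e) from by omega, show ¬(35 < e) from by omega,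
        show ¬(80 < e) from by omega, hA]
    · by_cases hB : e ≤ 35
      · simp [h0, show (25 < e) from by omega, show ¬(35 < e) from by omega,
          show ¬(80 < e) from by omega, hA, hB]
      · simp [h0, show (25 < e) from by omega, show (35 < e) from by omega,
          show ¬(80 < e) from by omega, hA, hB]
  · simp [h0, show (e < 18 ∨ 80 < e) from by omega]

lemma rango_eq_cls (e : Int) : pvRango e = (pvCls e).map pvG := by
  unfold pvRango pvCls pvG
  simp only [List.find?]
  by_cases h0 : e < 18 ∨ 80 < e
  · rcases h0 with hlt | hgt
    · simp [show e < 18 ∨ 80 < e from Or.inl hlt, show ¬(18 ≤ e) from by omega,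
        show ¬(25 ≤ e) from by omega, show ¬(35 ≤ e) from by omega]
    · simp [show e < 18 ∨ 80 < e from Or.inr hgt, show ¬(e ≤ 25) from by omega,
        show ¬(e ≤ 35) from by omega, show ¬(e ≤ 80) from by omega]
  · by_cases hA : e ≤ 25
    · simp [h0, show 18 ≤ e from by omega, hA]
    · by_cases hB : e ≤ 35
      · simp [h0, hA, show 25 ≤ e from by omega, hB]
      · simp [h0, hA, hB, show 35 ≤ e from by omega, show e ≤ 80 from by omega]

lemma cls_range (e : Int) :
    pvCls e = none ∨ pvCls e = some 0 ∨ pvCls e = some 1 ∨ pvCls e = some 2 := by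
  unfold pvCls; split_ifs <;> simp

lemma rango_eq_bucket (e1 e2 : Int) :
    (pvRango e1 == pvRango e2) = (pvBucket e1 == pvBucket e2) := by
  rw [bucket_eq_cls, bucket_eq_cls, rango_eq_cls, rango_eq_cls]
  rcases cls_range e1 with h | h | h | h <;> rcases cls_range e2 with h' | h' | h' | h' <;>
    rw [h, h'] <;> decide

theorem verificar_compatibilidad_edad_spec : Claim_equal_verificar_compatibilidad_edad := by
  intro u1 u2 _ hpre
  unfold Spec_verificar_compatibilidad_edad verificar_compatibilidad_edad verificar_compatibilidad_edad_alt
  obtain ⟨h1, h2⟩ := hpre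
  unfold pvLookupEdad pvLookupEdadAlt
  rcases hf1 : u1.find? (fun p => p.1 == "edad") with _ | p1
  · rw [hf1] at h1; simp at h1
  rcases hf2 : u2.find? (fun p => p.1 == "edad") with _ | p2
  · rw [hf2] at h2; simp at h2
  simp [hf1, hf2, rango_eq_bucket]
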